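-- pv_equiv track=rewrite | github.com/RezaAlmiro/cc-beeper-win | server/trust.py | mode_decision
-- ===== SOURCE A (Python) =====
-- from typing import Literal
--
-- Decision = Literal["allow", "ask", "deny"]
--
-- MODE_MATRIX: dict[str, dict[str, Decision]] = {
--     "strict": {
--         # strict asks for everything except pure observability
--         "Read": "ask",
--         "Meta": "allow",
--     },
--     "relaxed": {
--         "Read": "allow",
--         "Meta": "allow",
--         "Bash:read": "allow",
--         "Bash:git-read": "allow",
--         "MCP:read": "allow",
--     },
--     "trusted": {
--         "Read": "allow",
--         "Meta": "allow",
--         "Bash:read": "allow",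
--         "Bash:git-read": "allow",
--         "Bash:git-write-local": "allow",
--         "MCP:read": "allow",
--         "Write:project": "allow",
--         "Agent:explore": "allow",
--     },
--     "yolo": {
--         "Read": "allow",
--         "Meta": "allow",
--         "Bash:read": "allow",
--         "Bash:git-read": "allow",
--         "Bash:git-write-local": "allow",
--         "Bash:network": "allow",
--         "Bash:install": "allow",
--         "Bash:other": "allow",
--         "MCP:read": "allow",
--         "MCP:write": "allow",
--         "Write:project": "allow",
--         "Agent:explore": "allow",
--         "Agent:general-purpose": "allow",
--     },
-- }
--
-- def mode_decision(mode: str, category: str) -> Decision: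
--     """Look up the default decision for a category under the current mode."""
--     matrix = MODE_MATRIX.get(mode, MODE_MATRIX["strict"])
--     # longest-prefix match
--     best: Decision = "ask"
--     best_len = -1
--     for prefix, decision in matrix.items():
--         if category == prefix or category.startswith(prefix + ":"):
--             if len(prefix) > best_len:
--                 best = decision
--                 best_len = len(prefix)
--     return best
-- ===== SOURCE B (Python) =====
-- # Flat rule table + longest-first prefix descent (instead of a full-matrix argmax scan).
-- RULES = [
--     ("strict", "Read", "ask"),
--     ("strict", "Meta", "allow"),
--     ("relaxed", "Read", "allow"),
--     ("relaxed", "Meta", "allow"),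
--     ("relaxed", "Bash:read", "allow"),
--     ("relaxed", "Bash:git-read", "allow"),
--     ("relaxed", "MCP:read", "allow"),
--     ("trusted", "Read", "allow"),
--     ("trusted", "Meta", "allow"),
--     ("trusted", "Bash:read", "allow"),
--     ("trusted", "Bash:git-read", "allow"),
--     ("trusted", "Bash:git-write-local", "allow"),
--     ("trusted", "MCP:read", "allow"),
--     ("trusted", "Write:project", "allow"),
--     ("trusted", "Agent:explore", "allow"),
--     ("yolo", "Read", "allow"),
--     ("yolo", "Meta", "allow"),
--     ("yolo", "Bash:read", "allow"),
--     ("yolo", "Bash:git-read", "allow"),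
--     ("yolo", "Bash:git-write-local", "allow"),
--     ("yolo", "Bash:network", "allow"),
--     ("yolo", "Bash:install", "allow"),
--     ("yolo", "Bash:other", "allow"),
--     ("yolo", "MCP:read", "allow"),
--     ("yolo", "MCP:write", "allow"),
--     ("yolo", "Write:project", "allow"),
--     ("yolo", "Agent:explore", "allow"),
--     ("yolo", "Agent:general-purpose", "allow"),
-- ]
--
--
-- def _lookup(m, cand):
--     for rm, key, dec in RULES:
--         if rm == m and key == cand:
--             return dec
--     return None
--
--
-- def mode_decision(mode, category):
--     """Look up the default decision for a category under the current mode."""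
--     m = mode if any(r[0] == mode for r in RULES) else "strict"
--     # try the whole category, then each ':'-boundary prefix, longest first
--     dec = _lookup(m, category)
--     if dec is not None:
--         return dec
--     for i in range(len(category) - 1, -1, -1):
--         if category[i] == ":":
--             dec = _lookup(m, category[:i])
--             if dec is not None:
--                 return dec
--     return "ask"
-- ===== Notes on version B (the rewrite author's own statement) =====
-- stated objective: alternative
-- what changed: Replaces the full-matrix argmax scan (testing every dict key with startswith and keeping the longest) by a flat (mode,key,decision) rule list plus input-driven prefix descent: try the whole category, then each ':'-boundary prefix from longest to shortest, returning the first rule hit.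
import Mathlib
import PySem

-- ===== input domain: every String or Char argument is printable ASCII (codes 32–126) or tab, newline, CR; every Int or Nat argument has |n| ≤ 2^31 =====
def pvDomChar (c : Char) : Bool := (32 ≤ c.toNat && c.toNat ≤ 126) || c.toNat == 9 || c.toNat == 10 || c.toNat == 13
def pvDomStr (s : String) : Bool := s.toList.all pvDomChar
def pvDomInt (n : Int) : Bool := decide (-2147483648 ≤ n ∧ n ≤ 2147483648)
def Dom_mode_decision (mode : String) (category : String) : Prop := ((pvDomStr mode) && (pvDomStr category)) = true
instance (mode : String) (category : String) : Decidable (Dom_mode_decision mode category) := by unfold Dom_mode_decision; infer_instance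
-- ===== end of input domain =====

-- B replaces A's full-matrix argmax scan by a flat rule list queried for the category's ':'-boundary prefixes, longest first (alternative algorithm, same cost class).


-- ===== PORT A =====
-- the MODE_MATRIX constant as A uses it (nested dicts)
def pvMatrixStrict : PySem.Dict String String :=
  PySem.Dict.mk [("Read", "ask"), ("Meta", "allow")]
def pvMatrixRelaxed : PySem.Dict String String :=
  PySem.Dict.mk [("Read", "allow"), ("Meta", "allow"), ("Bash:read", "allow"),
    ("Bash:git-read", "allow"), ("MCP:read", "allow")]
def pvMatrixTrusted : PySem.Dict String String :=
  PySem.Dict.mk [("Read", "allow"), ("Meta", "allow"), ("Bash:read", "allow"),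
    ("Bash:git-read", "allow"), ("Bash:git-write-local", "allow"), ("MCP:read", "allow"),
    ("Write:project", "allow"), ("Agent:explore", "allow")]
def pvMatrixYolo : PySem.Dict String String :=
  PySem.Dict.mk [("Read", "allow"), ("Meta", "allow"), ("Bash:read", "allow"),
    ("Bash:git-read", "allow"), ("Bash:git-write-local", "allow"), ("Bash:network", "allow"),
    ("Bash:install", "allow"), ("Bash:other", "allow"), ("MCP:read", "allow"),
    ("MCP:write", "allow"), ("Write:project", "allow"), ("Agent:explore", "allow"),
    ("Agent:general-purpose", "allow")]
def pvModeMatrix : PySem.Dict String (PySem.Dict String String) :=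
  PySem.Dict.mk [("strict", pvMatrixStrict), ("relaxed", pvMatrixRelaxed),
    ("trusted", pvMatrixTrusted), ("yolo", pvMatrixYolo)]

-- A's loop body: if category == prefix or category.startswith(prefix + ":"): if len(prefix) > best_len: update
def pvStepA (category : String) (st : String × Int) (kv : String × String) : String × Int :=
  if category == kv.1 || PySem.Str.startswith category (kv.1 ++ ":") then
    if PySem.Str.len kv.1 > st.2 then (kv.2, PySem.Str.len kv.1) else st
  else st

def mode_decision (mode : String) (category : String) : String :=
  let matrix := PySem.Dict.getD pvModeMatrix mode pvMatrixStrict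
  (matrix.items.foldl (pvStepA category) ("ask", -1)).1

-- ===== PORT B =====
-- B's RULES constant: flat (mode, key, decision) triples
def pvRules : List (String × String × String) :=
  [("strict", "Read", "ask"),
   ("strict", "Meta", "allow"),
   ("relaxed", "Read", "allow"),
   ("relaxed", "Meta", "allow"),
   ("relaxed", "Bash:read", "allow"),
   ("relaxed", "Bash:git-read", "allow"),
   ("relaxed", "MCP:read", "allow"),
   ("trusted", "Read", "allow"),
   ("trusted", "Meta", "allow"),
   ("trusted", "Bash:read", "allow"),
   ("trusted", "Bash:git-read", "allow"),
   ("trusted", "Bash:git-write-local", "allow"),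
   ("trusted", "MCP:read", "allow"),
   ("trusted", "Write:project", "allow"),
   ("trusted", "Agent:explore", "allow"),
   ("yolo", "Read", "allow"),
   ("yolo", "Meta", "allow"),
   ("yolo", "Bash:read", "allow"),
   ("yolo", "Bash:git-read", "allow"),
   ("yolo", "Bash:git-write-local", "allow"),
   ("yolo", "Bash:network", "allow"),
   ("yolo", "Bash:install", "allow"),
   ("yolo", "Bash:other", "allow"),
   ("yolo", "MCP:read", "allow"),
   ("yolo", "MCP:write", "allow"),
   ("yolo", "Write:project", "allow"),
   ("yolo", "Agent:explore", "allow"),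
   ("yolo", "Agent:general-purpose", "allow")]

-- B's _lookup: first rule whose mode and key both match
def pvScanRules (m k : String) : List (String × String × String) → Option String
  | [] => none
  | r :: rest => if r.1 == m && r.2.1 == k then some r.2.2 else pvScanRules m k rest

-- B's loop: for i in range(len(category)-1, -1, -1): if category[i] == ':': _lookup(m, category[:i])
def pvPrefixDescend (m : String) (cs : List Char) : Nat → String
  | 0 => "ask"
  | n + 1 =>
    match cs[n]? with
    | some c =>
      if c == ':' then
        match pvScanRules m (String.ofList (cs.take n)) pvRules with
        | some d => d
        | none => pvPrefixDescend m cs n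
      else pvPrefixDescend m cs n
    | none => pvPrefixDescend m cs n

def mode_decision_alt (mode : String) (category : String) : String :=
  let m := if pvRules.any (fun r => r.1 == mode) then mode else "strict"
  match pvScanRules m category pvRules with
  | some d => d
  | none => pvPrefixDescend m category.toList category.toList.length

-- ===== PRECONDITION & SPEC =====
def Spec_mode_decision (mode : String) (category : String) (out : String) : Prop := out = mode_decision_alt mode category
instance (mode : String) (category : String) (out : String) : Decidable (Spec_mode_decision mode category out) := by unfold Spec_mode_decision; infer_instance

-- ===== CLAIM (what is proved, stated in full; the proofs are below) =====
def Claim_equal_mode_decision : Prop := ∀ (mode : String) (category : String), Dom_mode_decision mode category → Spec_mode_decision mode category (mode_decision mode category)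

-- ===== LEMMAS AND PROOFS =====

-- B's rule scan computes exactly A's matrix lookup, for every mode and key
theorem pvGetNil {v : Type} (k : String) : (PySem.Dict.mk ([] : List (String × v))).get? k = none := rfl

theorem pvBridge (mode k : String) :
    pvScanRules (if pvRules.any (fun r => r.1 == mode) then mode else "strict") k pvRules
      = (PySem.Dict.getD pvModeMatrix mode pvMatrixStrict).get? k := by
  by_cases h1 : mode = "strict"
  · subst h1
    simp [pvRules, pvScanRules, pvModeMatrix, pvMatrixStrict,
      PySem.Dict.getD_eq_get?_getD, PySem.Dict.get?_mk_cons, pvGetNil]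
  · by_cases h2 : mode = "relaxed"
    · subst h2
      simp [pvRules, pvScanRules, pvModeMatrix, pvMatrixRelaxed,
        PySem.Dict.getD_eq_get?_getD, PySem.Dict.get?_mk_cons, pvGetNil]
    · by_cases h3 : mode = "trusted"
      · subst h3
        simp [pvRules, pvScanRules, pvModeMatrix, pvMatrixTrusted,
          PySem.Dict.getD_eq_get?_getD, PySem.Dict.get?_mk_cons, pvGetNil]
      · by_cases h4 : mode = "yolo"
        · subst h4
          simp [pvRules, pvScanRules, pvModeMatrix, pvMatrixYolo,
            PySem.Dict.getD_eq_get?_getD, PySem.Dict.get?_mk_cons, pvGetNil]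
        · have e1 : ("strict" == mode) = false := by simp [beq_eq_false_iff_ne]; exact fun h => h1 h.symm
          have e2 : ("relaxed" == mode) = false := by simp [beq_eq_false_iff_ne]; exact fun h => h2 h.symm
          have e3 : ("trusted" == mode) = false := by simp [beq_eq_false_iff_ne]; exact fun h => h3 h.symm
          have e4 : ("yolo" == mode) = false := by simp [beq_eq_false_iff_ne]; exact fun h => h4 h.symm
          simp [pvRules, pvScanRules, pvModeMatrix, pvMatrixStrict,
            PySem.Dict.getD_eq_get?_getD, PySem.Dict.get?_mk_cons, pvGetNil,
            e1, e2, e3, e4]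

def pvGoodAt (d : PySem.Dict String String) (cs : List Char) (i : Nat) : Bool :=
  decide (cs[i]? = some ':') && (d.get? (String.ofList (cs.take i))).isSome

theorem pvMatch_iff (category k : String) :
    (category == k || PySem.Str.startswith category (k ++ ":")) = true ↔
    (k.toList = category.toList.take k.toList.length ∧
      (k.toList.length = category.toList.length ∨
        category.toList[k.toList.length]? = some ':')) := by
  have hcol : (":" : String).toList = [':'] := rfl
  rw [Bool.or_eq_true, beq_iff_eq]
  constructor
  · rintro (rfl | hsw)
    · exact ⟨by simp, Or.inl rfl⟩
    · have h : (k.toList ++ [':']) <+: category.toList := by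
        have := (PySem.Chars.startswith_iff category.toList (k ++ ":").toList).mp
          (by simpa [PySem.Str.startswith] using hsw)
        simpa [String.toList_append, hcol] using this
      obtain ⟨t, ht⟩ := h
      rw [List.append_assoc] at ht
      refine ⟨?_, Or.inr ?_⟩
      · rw [← ht, List.take_left]
      · rw [← ht, List.getElem?_append_right (le_refl _)]
        simp
  · rintro ⟨htake, hc | hc⟩
    · left
      apply String.toList_inj.mp
      rw [htake, hc, List.take_length]
    · right
      have hlt : k.toList.length < category.toList.length := by
        exact (List.getElem?_eq_some_iff.mp hc).1
      have hdrop : category.toList.drop k.toList.length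
          = ':' :: category.toList.drop (k.toList.length + 1) := by
        rw [List.drop_eq_getElem_cons hlt]
        congr 1
        exact (List.getElem?_eq_some_iff.mp hc).2
      have hpre : (k.toList ++ [':']) <+: category.toList := by
        refine ⟨category.toList.drop (k.toList.length + 1), ?_⟩
        rw [List.append_assoc]
        conv_rhs => rw [← List.take_append_drop k.toList.length category.toList]
        rw [hdrop, ← htake]
        rfl
      simp only [PySem.Str.startswith]
      rw [PySem.Chars.startswith_iff]
      simpa [String.toList_append, hcol] using hpre

theorem pvFoldA_none (category : String) (l : List (String × String)) (st : String × Int)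
    (h : ∀ kv ∈ l, (category == kv.1 || PySem.Str.startswith category (kv.1 ++ ":")) = true →
      PySem.Str.len kv.1 ≤ st.2) :
    l.foldl (pvStepA category) st = st := by
  induction l with
  | nil => rfl
  | cons kv rest ih =>
    have hstep : pvStepA category st kv = st := by
      unfold pvStepA
      split
      · next hm =>
        have := h kv (List.mem_cons_self) hm
        rw [if_neg (by omega)]
      · rfl
    rw [List.foldl_cons, hstep]
    exact ih (fun kv' h' hm => h kv' (List.mem_cons_of_mem _ h') hm)

theorem pvFoldA_max (category : String) (l : List (String × String)) (st : String × Int)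
    (kv0 : String × String) (h0 : kv0 ∈ l)
    (hm : (category == kv0.1 || PySem.Str.startswith category (kv0.1 ++ ":")) = true)
    (hmax : ∀ kv ∈ l, (category == kv.1 || PySem.Str.startswith category (kv.1 ++ ":")) = true →
      PySem.Str.len kv.1 ≤ PySem.Str.len kv0.1)
    (huniq : ∀ kv ∈ l, (category == kv.1 || PySem.Str.startswith category (kv.1 ++ ":")) = true →
      PySem.Str.len kv.1 = PySem.Str.len kv0.1 → kv = kv0)
    (hst : st.2 < PySem.Str.len kv0.1) :
    l.foldl (pvStepA category) st = (kv0.2, PySem.Str.len kv0.1) := by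
  induction l generalizing st with
  | nil => cases h0
  | cons kv rest ih =>
    rw [List.foldl_cons]
    by_cases hm1 : (category == kv.1 || PySem.Str.startswith category (kv.1 ++ ":")) = true
    · by_cases heq : kv = kv0
      · subst heq
        have hstep : pvStepA category st kv = (kv.2, PySem.Str.len kv.1) := by
          unfold pvStepA
          rw [if_pos hm1, if_pos (by omega)]
        rw [hstep]
        exact pvFoldA_none category rest _ (fun kv' h' hm' => hmax kv' (List.mem_cons_of_mem _ h') hm')
      · have h0' : kv0 ∈ rest := by
          rcases List.mem_cons.mp h0 with h | h
          · exact absurd h.symm heq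
          · exact h
        have hlt : PySem.Str.len kv.1 < PySem.Str.len kv0.1 := by
          have hle := hmax kv (List.mem_cons_self) hm1
          rcases lt_or_eq_of_le hle with h | h
          · exact h
          · exact absurd (huniq kv (List.mem_cons_self) hm1 h) heq
        have hstep : (pvStepA category st kv).2 < PySem.Str.len kv0.1 := by
          unfold pvStepA
          rw [if_pos hm1]
          split
          · simpa using hlt
          · exact hst
        exact ih _ h0' (fun kv' h' hm' => hmax kv' (List.mem_cons_of_mem _ h') hm')
          (fun kv' h' hm' he => huniq kv' (List.mem_cons_of_mem _ h') hm' he) hstep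
    · have hstep : pvStepA category st kv = st := by
        unfold pvStepA; rw [if_neg hm1]
      have h0' : kv0 ∈ rest := by
        rcases List.mem_cons.mp h0 with h | h
        · subst h; exact absurd hm hm1
        · exact h
      rw [hstep]
      exact ih _ h0' (fun kv' h' hm' => hmax kv' (List.mem_cons_of_mem _ h') hm')
        (fun kv' h' hm' he => huniq kv' (List.mem_cons_of_mem _ h') hm' he) hst

theorem pvDescend_none (m0 : String) (d : PySem.Dict String String)
    (hbr : ∀ k, pvScanRules m0 k pvRules = d.get? k) (cs : List Char) (n : Nat)
    (h : ∀ i < n, pvGoodAt d cs i = false) : pvPrefixDescend m0 cs n = "ask" := by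
  induction n with
  | zero => rfl
  | succ n ih =>
    have hn := h n (Nat.lt_succ_self n)
    unfold pvGoodAt at hn
    cases hg : cs[n]? with
    | none =>
      unfold pvPrefixDescend
      rw [hg]
      exact ih (fun i hi => h i (Nat.lt_succ_of_lt hi))
    | some c =>
      unfold pvPrefixDescend
      rw [hg]
      show (if (c == ':') = true then
        (match pvScanRules m0 (String.ofList (cs.take n)) pvRules with
          | some d => d
          | none => pvPrefixDescend m0 cs n)
        else pvPrefixDescend m0 cs n) = "ask"
      by_cases hc : c = ':'
      · subst hc
        rw [hg] at hn
        simp only [decide_true, Bool.true_and, Option.isSome_eq_false_iff,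
          Option.isNone_iff_eq_none] at hn
        rw [hbr, hn, if_pos (by simp)]
        exact ih (fun i hi => h i (Nat.lt_succ_of_lt hi))
      · rw [if_neg (by simpa using hc)]
        exact ih (fun i hi => h i (Nat.lt_succ_of_lt hi))

theorem pvDescend_max (m0 : String) (d : PySem.Dict String String)
    (hbr : ∀ k, pvScanRules m0 k pvRules = d.get? k) (cs : List Char) (n i : Nat) (v : String)
    (hi : i < n) (hc : cs[i]? = some ':')
    (hv : d.get? (String.ofList (cs.take i)) = some v)
    (hmax : ∀ j, i < j → j < n → pvGoodAt d cs j = false) :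
    pvPrefixDescend m0 cs n = v := by
  induction n with
  | zero => omega
  | succ n ih =>
    by_cases hin : i = n
    · subst hin
      unfold pvPrefixDescend
      rw [hc]
      show (if (':' == ':') = true then
        (match pvScanRules m0 (String.ofList (cs.take i)) pvRules with
          | some d => d
          | none => pvPrefixDescend m0 cs i)
        else pvPrefixDescend m0 cs i) = v
      rw [if_pos (by simp), hbr, hv]
    · have hi' : i < n := by omega
      have hn := hmax n hi' (Nat.lt_succ_self n)
      unfold pvGoodAt at hn
      cases hg : cs[n]? with
      | none =>
        unfold pvPrefixDescend
        rw [hg]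
        exact ih hi' (fun j h1 h2 => hmax j h1 (Nat.lt_succ_of_lt h2))
      | some c =>
        unfold pvPrefixDescend
        rw [hg]
        show (if (c == ':') = true then
          (match pvScanRules m0 (String.ofList (cs.take n)) pvRules with
            | some d => d
            | none => pvPrefixDescend m0 cs n)
          else pvPrefixDescend m0 cs n) = v
        by_cases hcc : c = ':'
        · subst hcc
          rw [hg] at hn
          simp only [decide_true, Bool.true_and, Option.isSome_eq_false_iff,
            Option.isNone_iff_eq_none] at hn
          rw [hbr, hn, if_pos (by simp)]
          exact ih hi' (fun j h1 h2 => hmax j h1 (Nat.lt_succ_of_lt h2))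
        · rw [if_neg (by simpa using hcc)]
          exact ih hi' (fun j h1 h2 => hmax j h1 (Nat.lt_succ_of_lt h2))

theorem pvMatrix_nodup (mode : String) :
    (PySem.Dict.getD pvModeMatrix mode pvMatrixStrict).keys.Nodup := by
  have h : PySem.Dict.getD pvModeMatrix mode pvMatrixStrict = pvMatrixStrict
      ∨ PySem.Dict.getD pvModeMatrix mode pvMatrixStrict = pvMatrixRelaxed
      ∨ PySem.Dict.getD pvModeMatrix mode pvMatrixStrict = pvMatrixTrusted
      ∨ PySem.Dict.getD pvModeMatrix mode pvMatrixStrict = pvMatrixYolo := by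
    rw [PySem.Dict.getD_eq_get?_getD]
    unfold pvModeMatrix
    simp only [PySem.Dict.get?_mk_cons]
    split_ifs <;> simp [PySem.Dict.get?]
  rcases h with h | h | h | h <;> rw [h] <;> decide

-- ===== VERDICT (by name: the statement is the Claim_ definition above) =====
theorem mode_decision_spec : Claim_equal_mode_decision := by
  intro mode category _hdom
  show mode_decision mode category = mode_decision_alt mode category
  show (List.foldl (pvStepA category) ("ask", -1)
      (PySem.Dict.getD pvModeMatrix mode pvMatrixStrict).items).1 =
    (match pvScanRules (if pvRules.any (fun r => r.1 == mode) then mode else "strict")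
        category pvRules with
      | some d => d
      | none => pvPrefixDescend (if pvRules.any (fun r => r.1 == mode) then mode else "strict")
          category.toList category.toList.length)
  set m := PySem.Dict.getD pvModeMatrix mode pvMatrixStrict with hmdef
  set m0 := (if pvRules.any (fun r => r.1 == mode) then mode else "strict") with hm0def
  have hbr : ∀ k, pvScanRules m0 k pvRules = m.get? k := fun k => pvBridge mode k
  rw [hbr category]
  have hnd : m.keys.Nodup := pvMatrix_nodup mode
  -- any matched key is at most as long as category
  have hlen_le : ∀ kv : String × String,
      (category == kv.1 || PySem.Str.startswith category (kv.1 ++ ":")) = true →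
      kv.1.toList.length ≤ category.toList.length := by
    intro kv hmm
    obtain ⟨ht, _⟩ := (pvMatch_iff category kv.1).mp hmm
    have := congrArg List.length ht
    simp only [List.length_take] at this
    omega
  cases hfull : m.get? category with
  | some v =>
    have h0 : (category, v) ∈ m.items := PySem.Dict.mem_items_of_get?_eq_some m hfull
    have hm : (category == (category, v).1 ||
        PySem.Str.startswith category ((category, v).1 ++ ":")) = true := by simp
    rw [pvFoldA_max category m.items ("ask", -1) (category, v) h0 hm ?_ ?_ ?_]
    · intro kv hkv hmm
      have := hlen_le kv hmm
      simp only [PySem.Str.len]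
      exact_mod_cast this
    · intro kv hkv hmm heq
      simp only [PySem.Str.len, Nat.cast_inj] at heq
      obtain ⟨ht, _⟩ := (pvMatch_iff category kv.1).mp hmm
      have hk1 : kv.1 = category := by
        apply String.toList_inj.mp
        rw [ht, heq, List.take_length]
      have hv2 : m.get? kv.1 = some kv.2 := PySem.Dict.get?_of_mem_items m hkv hnd
      rw [hk1, hfull] at hv2
      have : kv.2 = v := by injection hv2 with h; exact h.symm
      exact Prod.ext hk1 this
    · show (-1 : Int) < PySem.Str.len category
      simp only [PySem.Str.len]
      omega
  | none =>
    -- no matched key has full length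
    have hnofull : ∀ kv : String × String, kv ∈ m.items →
        (category == kv.1 || PySem.Str.startswith category (kv.1 ++ ":")) = true →
        kv.1.toList.length ≠ category.toList.length := by
      intro kv hkv hmm hlen
      obtain ⟨ht, _⟩ := (pvMatch_iff category kv.1).mp hmm
      have hk1 : kv.1 = category := by
        apply String.toList_inj.mp
        rw [ht, hlen, List.take_length]
      have hv2 : m.get? kv.1 = some kv.2 := PySem.Dict.get?_of_mem_items m hkv hnd
      rw [hk1, hfull] at hv2
      simp at hv2
    -- every matched key yields a good loop index
    have hgood : ∀ kv : String × String, kv ∈ m.items →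
        (category == kv.1 || PySem.Str.startswith category (kv.1 ++ ":")) = true →
        pvGoodAt m category.toList kv.1.toList.length = true := by
      intro kv hkv hmm
      obtain ⟨ht, hc⟩ := (pvMatch_iff category kv.1).mp hmm
      rcases hc with hc | hc
      · exact absurd hc (hnofull kv hkv hmm)
      · have hofl : String.ofList (category.toList.take kv.1.toList.length) = kv.1 := by
          rw [← ht, String.ofList_toList]
        have hv2 : m.get? kv.1 = some kv.2 := PySem.Dict.get?_of_mem_items m hkv hnd
        unfold pvGoodAt
        rw [hofl, hv2, hc]
        simp
    by_cases hg : ∃ i, i < category.toList.length ∧ pvGoodAt m category.toList i = true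
    · obtain ⟨i0, hi0, hg0⟩ := hg
      set istar := Nat.findGreatest (fun j => pvGoodAt m category.toList j = true) category.toList.length with histar
      have hPi : pvGoodAt m category.toList istar = true :=
        Nat.findGreatest_spec (P := fun j => pvGoodAt m category.toList j = true) (le_of_lt hi0) hg0
      have himax : ∀ j, istar < j → j ≤ category.toList.length → pvGoodAt m category.toList j = false := by
        intro j h1 h2
        by_contra h
        have hP : pvGoodAt m category.toList j = true := by
          cases hb : pvGoodAt m category.toList j
          · exact absurd hb h
          · rfl
        have := Nat.le_findGreatest (P := fun j => pvGoodAt m category.toList j = true) h2 hP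
        omega
      unfold pvGoodAt at hPi
      simp only [Bool.and_eq_true, decide_eq_true_eq, Option.isSome_iff_exists] at hPi
      obtain ⟨hcol, v, hv⟩ := hPi
      have hilt : istar < category.toList.length := (List.getElem?_eq_some_iff.mp hcol).1
      -- the B side returns v
      rw [pvDescend_max m0 m hbr category.toList category.toList.length istar v hilt hcol hv
        (fun j h1 h2 => himax j h1 (le_of_lt h2))]
      -- the A side returns v
      have hlen0 : (String.ofList (category.toList.take istar)).toList.length = istar := by
        rw [String.toList_ofList, List.length_take]
        omega
      have h0 : (String.ofList (category.toList.take istar), v) ∈ m.items :=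
        PySem.Dict.mem_items_of_get?_eq_some m hv
      have hm0 : (category == (String.ofList (category.toList.take istar), v).1 ||
          PySem.Str.startswith category ((String.ofList (category.toList.take istar), v).1 ++ ":")) = true := by
        apply (pvMatch_iff category _).mpr
        refine ⟨?_, Or.inr ?_⟩
        · rw [String.toList_ofList, List.length_take, Nat.min_eq_left (le_of_lt hilt)]
        · rw [hlen0]
          exact hcol
      -- any matched key has length at most istar
      have hle : ∀ kv : String × String, kv ∈ m.items →
          (category == kv.1 || PySem.Str.startswith category (kv.1 ++ ":")) = true →
          kv.1.toList.length ≤ istar := by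
        intro kv hkv hmm
        have hne := hnofull kv hkv hmm
        have hlt : kv.1.toList.length < category.toList.length := by
          have := hlen_le kv hmm
          omega
        exact Nat.le_findGreatest (le_of_lt hlt) (hgood kv hkv hmm)
      rw [pvFoldA_max category m.items ("ask", -1) (String.ofList (category.toList.take istar), v) h0 hm0 ?_ ?_ ?_]
      · intro kv hkv hmm
        simp only [PySem.Str.len, hlen0]
        exact_mod_cast hle kv hkv hmm
      · intro kv hkv hmm heq
        simp only [PySem.Str.len, hlen0, Nat.cast_inj] at heq
        obtain ⟨ht, _⟩ := (pvMatch_iff category kv.1).mp hmm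
        have hk1 : kv.1 = String.ofList (category.toList.take istar) := by
          apply String.toList_inj.mp
          rw [ht, heq, String.toList_ofList]
        have hv2 : m.get? kv.1 = some kv.2 := PySem.Dict.get?_of_mem_items m hkv hnd
        rw [hk1, hv] at hv2
        have : kv.2 = v := by injection hv2 with h; exact h.symm
        exact Prod.ext hk1 this
      · show (-1 : Int) < PySem.Str.len (String.ofList (category.toList.take istar), v).1
        simp only [PySem.Str.len, hlen0]
        omega
    · push Not at hg
      have hgf : ∀ i < category.toList.length, pvGoodAt m category.toList i = false := by
        intro i hi
        cases hb : pvGoodAt m category.toList i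
        · rfl
        · exact absurd hb (by simpa using hg i hi)
      rw [pvDescend_none m0 m hbr category.toList category.toList.length hgf]
      rw [pvFoldA_none category m.items ("ask", -1) ?_]
      intro kv hkv hmm
      exfalso
      have hne := hnofull kv hkv hmm
      have hlt : kv.1.toList.length < category.toList.length := by
        have := hlen_le kv hmm
        omega
      have := hgood kv hkv hmm
      rw [hgf _ hlt] at this
      exact Bool.noConfusion this
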